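-- pv_equiv track=rewrite | github.com/ViralLove/amanita | bot/language_translator.py | extract_marker_and_text
-- ===== SOURCE A (Python) =====
-- def extract_marker_and_text(text: str) -> (str, str):
--     """Если строка начинается с changed_, возвращает (маркер без ведущих подчёркиваний, основной текст)"""
--     if text.startswith("changed_"):
--         i = 7
--         while i < len(text) and (text[i].isdigit() or text[i] == '_'):
--             i += 1
--         marker = text[7:i].lstrip('_')  # убираем ведущие подчёркивания
--         main_text = text[i:]
--         return marker, main_text
--     return '', text
-- ===== SOURCE B (Python) =====
-- def extract_marker_and_text(text: str) -> (str, str):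
--     """Если строка начинается с changed_, возвращает (маркер без ведущих подчёркиваний, основной текст)"""
--     if not text.startswith("changed_"):
--         return '', text
--     marker = []
--     for pos, ch in enumerate(text[8:], 8):
--         if not (ch.isdigit() or ch == '_'):
--             return ''.join(marker), text[pos:]
--         if marker or ch != '_':
--             marker.append(ch)
--     return ''.join(marker), ''
-- ===== Notes on version B (the rewrite author's own statement) =====
-- stated objective: alternative
-- what changed: Single fused pass with an accumulator and early return: the marker is built character by character while scanning (leading underscores skipped via the accumulator's emptiness), instead of A's staged scan-for-index then slice-and-lstrip passes.
import Mathlib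
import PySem

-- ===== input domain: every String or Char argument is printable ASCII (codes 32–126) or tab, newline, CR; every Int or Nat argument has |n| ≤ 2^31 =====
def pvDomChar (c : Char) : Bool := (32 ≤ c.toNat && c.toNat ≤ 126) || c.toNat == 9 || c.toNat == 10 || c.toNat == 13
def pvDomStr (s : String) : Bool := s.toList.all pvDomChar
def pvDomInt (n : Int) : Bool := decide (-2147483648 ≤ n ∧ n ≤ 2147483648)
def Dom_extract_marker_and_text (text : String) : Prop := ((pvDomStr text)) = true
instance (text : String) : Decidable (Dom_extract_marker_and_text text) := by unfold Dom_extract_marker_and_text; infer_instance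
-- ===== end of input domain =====

-- B is a single fused pass with an accumulator and early return, replacing A's staged
-- scan-for-index / slice / lstrip passes (alternative decomposition; same cost).
-- Note: Python str.isdigit also accepts non-ASCII digit characters; on the ASCII domain Dom_
-- it is exactly '0'..'9', which is what the ports use.

-- ===== PORT A =====
-- the while-loop: advance i while i < len(text) and (text[i].isdigit() or text[i] == '_')
def pvScanA (s : List Char) (i : Nat) : Nat :=
  if h : i < s.length then
    if PySem.Chars.isdigit s[i] || s[i] == '_' then pvScanA s (i + 1) else i
  else i
termination_by s.length - i

def extract_marker_and_text (text : String) : String × String :=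
  if PySem.Str.startswith text "changed_" then
    let i := pvScanA text.toList 7
    -- text[7:i].lstrip('_'): lstrip of a single char = dropWhile (exact)
    let marker := (PySem.List.slice text.toList (some 7) (some (i : Int))).dropWhile (fun c => c == '_')
    let main_text := PySem.List.slice text.toList (some (i : Int)) none
    (String.ofList marker, String.ofList main_text)
  else ("", text)

-- ===== PORT B =====
-- the for-loop over enumerate(text[8:], 8): the current suffix of the iteration equals
-- text[pos:] at each step, so the loop carries that suffix instead of the index pos (exact).
def pvLoopB : List Char → List Char → String × String
  | [], marker => (String.ofList marker, "")
  | c :: cs, marker =>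
    if !(PySem.Chars.isdigit c || c == '_') then
      -- early return: (''.join(marker), text[pos:])
      (String.ofList marker, String.ofList (c :: cs))
    else
      -- if marker or ch != '_': marker.append(ch)
      pvLoopB cs (if !marker.isEmpty || c != '_' then marker ++ [c] else marker)

def extract_marker_and_text_alt (text : String) : String × String :=
  if PySem.Str.startswith text "changed_" then
    pvLoopB (text.toList.drop 8) []
  else ("", text)

-- ===== PRECONDITION & SPEC =====
def Spec_extract_marker_and_text (text : String) (out : String × String) : Prop := out = extract_marker_and_text_alt text
instance (text : String) (out : String × String) : Decidable (Spec_extract_marker_and_text text out) := by unfold Spec_extract_marker_and_text; infer_instance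

-- ===== CLAIM (what is proved, stated in full; the proofs are below) =====
def Claim_equal_extract_marker_and_text : Prop := ∀ (text : String), Dom_extract_marker_and_text text → Spec_extract_marker_and_text text (extract_marker_and_text text)

-- ===== LEMMAS AND PROOFS =====

lemma pvScanA_eq (s : List Char) (i : Nat) :
    pvScanA s i =
      i + ((s.drop i).takeWhile (fun c => PySem.Chars.isdigit c || c == '_')).length := by
  have key : ∀ n j, s.length - j ≤ n → pvScanA s j =
      j + ((s.drop j).takeWhile (fun c => PySem.Chars.isdigit c || c == '_')).length := by
    intro n
    induction n with
    | zero =>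
        intro j hj
        have h : ¬ j < s.length := by omega
        rw [pvScanA, dif_neg h, List.drop_eq_nil_of_le (by omega)]
        simp
    | succ n ih =>
        intro j hj
        by_cases h : j < s.length
        · rw [pvScanA, dif_pos h]
          split_ifs with hp
          · have hc : List.takeWhile (fun c => PySem.Chars.isdigit c || c == '_')
                (s[j] :: List.drop (j + 1) s)
                = s[j] :: List.takeWhile (fun c => PySem.Chars.isdigit c || c == '_')
                    (List.drop (j + 1) s) := List.takeWhile_cons_of_pos hp
            rw [ih (j + 1) (by omega), List.drop_eq_getElem_cons h, hc, List.length_cons]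
            omega
          · have hc : List.takeWhile (fun c => PySem.Chars.isdigit c || c == '_')
                (s[j] :: List.drop (j + 1) s) = [] := List.takeWhile_cons_of_neg hp
            rw [List.drop_eq_getElem_cons h, hc]
            simp
        · rw [pvScanA, dif_neg h, List.drop_eq_nil_of_le (by omega)]
          simp
  exact key (s.length - i) i le_rfl

lemma take_takeWhile {α : Type} (p : α → Bool) (l : List α) :
    l.take (l.takeWhile p).length = l.takeWhile p :=
  (List.prefix_iff_eq_take.mp (l.takeWhile_prefix p)).symm

lemma drop_takeWhile {α : Type} (p : α → Bool) (l : List α) :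
    l.drop (l.takeWhile p).length = l.dropWhile p := by
  nth_rewrite 2 [← List.takeWhile_append_dropWhile (p := p) (l := l)]
  exact List.drop_left

-- invariant of B's loop: the marker accumulated so far prefixes the result; while the
-- accumulator is empty we are still skipping leading underscores
lemma pvLoopB_eq (s acc : List Char) :
    pvLoopB s acc =
      (String.ofList (acc ++
        (if acc.isEmpty then
          (s.takeWhile (fun c => PySem.Chars.isdigit c || c == '_')).dropWhile (fun c => c == '_')
         else s.takeWhile (fun c => PySem.Chars.isdigit c || c == '_'))),
       String.ofList (s.dropWhile (fun c => PySem.Chars.isdigit c || c == '_'))) := by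
  induction s generalizing acc with
  | nil => simp [pvLoopB]
  | cons c cs ih =>
      rw [pvLoopB]
      by_cases hp : (PySem.Chars.isdigit c || c == '_') = true
      · have hT : (c :: cs).takeWhile (fun c => PySem.Chars.isdigit c || c == '_')
            = c :: cs.takeWhile (fun c => PySem.Chars.isdigit c || c == '_') :=
          List.takeWhile_cons_of_pos hp
        have hD : (c :: cs).dropWhile (fun c => PySem.Chars.isdigit c || c == '_')
            = cs.dropWhile (fun c => PySem.Chars.isdigit c || c == '_') :=
          List.dropWhile_cons_of_pos hp
        rw [if_neg (by simp [hp]), hT, hD]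
        by_cases he : acc.isEmpty
        · by_cases hu : c = '_'
          · rw [if_neg (by simp [he, hu]), ih, if_pos he,
              List.dropWhile_cons_of_pos (by simp [hu]), if_pos he]
          · rw [if_pos (by simp [hu]), ih,
              if_neg (by simp),
              List.dropWhile_cons_of_neg (by simp [hu])]
            simp [List.isEmpty_iff.mp he]
        · rw [if_pos (by simp [he]), ih, if_neg (by simp)]
          simp [he]
      · have hT : (c :: cs).takeWhile (fun c => PySem.Chars.isdigit c || c == '_') = [] :=
          List.takeWhile_cons_of_neg hp
        have hD : (c :: cs).dropWhile (fun c => PySem.Chars.isdigit c || c == '_')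
            = c :: cs := List.dropWhile_cons_of_neg hp
        rw [if_pos (by simp [hp]), hT, hD]
        simp
-- ===== VERDICT (by name: the statement is the Claim_ definition above) =====
theorem extract_marker_and_text_spec : Claim_equal_extract_marker_and_text := by
  intro text _
  unfold Spec_extract_marker_and_text extract_marker_and_text extract_marker_and_text_alt
  by_cases hs : PySem.Str.startswith text "changed_"
  · simp only [hs, if_pos]
    have hpr : "changed_".toList <+: text.toList := by
      have := hs
      rw [PySem.Str.startswith, PySem.Chars.startswith_iff] at this
      exact this
    obtain ⟨r, hr⟩ := hpr
    set p : Char → Bool := fun c => PySem.Chars.isdigit c || c == '_' with hp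
    have h7 : text.toList.drop 7 = '_' :: r := by rw [← hr]; rfl
    have h8 : text.toList.drop 8 = r := by rw [← hr]; rfl
    set t := (r.takeWhile p).length with ht
    have hscan : pvScanA text.toList 7 = 8 + t := by
      rw [pvScanA_eq, h7, List.takeWhile_cons_of_pos (by decide : p '_' = true)]
      simp [ht]; omega
    have hmarker :
        PySem.List.slice text.toList (some 7) (some ((pvScanA text.toList 7 : Nat) : Int))
          = '_' :: r.takeWhile p := by
      rw [hscan, show (7 : Int) = ((7 : Nat) : Int) from rfl, PySem.List.slice_natCast, h7,
        show 8 + t - 7 = t + 1 from by omega, List.take_succ_cons, ht, take_takeWhile]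
    have hmain :
        PySem.List.slice text.toList (some ((pvScanA text.toList 7 : Nat) : Int)) none
          = r.dropWhile p := by
      rw [hscan, PySem.List.slice_from_natCast, ← List.drop_drop, h8, ht, drop_takeWhile]
    rw [hmarker, hmain, h8, pvLoopB_eq]
    rw [List.dropWhile_cons_of_pos (by rfl)]
    rfl
  · simp only [hs, if_neg, Bool.false_eq_true, not_false_iff]
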